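-- pv_equiv track=rewrite | github.com/konrad-kocik/advent-of-code | 2022/day_8_treetop_tree_house/forest.py | _mark_visible_trees
-- ===== SOURCE A (Python) =====
-- def _mark_visible_trees(forest):
--     forest_visibility = []
--
--     for row_id, row in enumerate(forest):
--         row_visibility = []
--
--         for tree_id, tree in enumerate(row):
--             tree_visibility = any([_is_tree_visible_from_north(forest, row_id, tree_id),
--                                    _is_tree_visible_from_south(forest, row_id, tree_id),
--                                    _is_tree_visible_from_east(forest, row_id, tree_id),
--                                    _is_tree_visible_from_west(forest, row_id, tree_id)])
--             row_visibility.append(tree_visibility)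
--
--         forest_visibility.append(row_visibility)
--
--     return forest_visibility
--
-- def _is_tree_visible_from_north(forest, row_id_to_check, tree_id_to_check):
--     for curr_row_id, curr_row in enumerate(forest):
--         if curr_row_id < row_id_to_check:
--             if curr_row[tree_id_to_check] >= forest[row_id_to_check][tree_id_to_check]:
--                 return False
--     return True
--
-- def _is_tree_visible_from_south(forest, row_id_to_check, tree_id_to_check):
--     for curr_row_id, curr_row in enumerate(forest):
--         if curr_row_id > row_id_to_check:
--             if curr_row[tree_id_to_check] >= forest[row_id_to_check][tree_id_to_check]:
--                 return False
--     return True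
--
-- def _is_tree_visible_from_east(forest, row_id_to_check, tree_id_to_check):
--     for curr_tree_id, curr_tree in enumerate(forest[row_id_to_check]):
--         if curr_tree_id > tree_id_to_check:
--             if curr_tree >= forest[row_id_to_check][tree_id_to_check]:
--                 return False
--     return True
--
-- def _is_tree_visible_from_west(forest, row_id_to_check, tree_id_to_check):
--     for curr_tree_id, curr_tree in enumerate(forest[row_id_to_check]):
--         if curr_tree_id < tree_id_to_check:
--             if curr_tree >= forest[row_id_to_check][tree_id_to_check]:
--                 return False
--     return True
-- ===== SOURCE B (Python) =====
-- def _mark_visible_trees(forest):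
--     def west(row):
--         out, mx = [], None
--         for t in row:
--             out.append(mx is None or t > mx)
--             mx = t if mx is None else max(mx, t)
--         return out
--
--     def east(row):
--         return list(reversed(west(list(reversed(row)))))
--
--     m = len(forest[0]) if forest else 0
--     cols = [[row[j] for row in forest] for j in range(m)]
--     W = [west(r) for r in forest]
--     E = [east(r) for r in forest]
--     N = [west(c) for c in cols]
--     S = [east(c) for c in cols]
--     return [[W[i][j] or E[i][j] or N[j][i] or S[j][i]
--              for j in range(len(forest[i]))]
--             for i in range(len(forest))]
-- ===== Notes on version B (the rewrite author's own statement) =====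
-- stated objective: faster
-- what changed: Replaced the per-cell scans along each of the four directions by four whole-grid running-maximum sweeps (prefix maxima over rows and over columns), combined per cell.
import Mathlib
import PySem

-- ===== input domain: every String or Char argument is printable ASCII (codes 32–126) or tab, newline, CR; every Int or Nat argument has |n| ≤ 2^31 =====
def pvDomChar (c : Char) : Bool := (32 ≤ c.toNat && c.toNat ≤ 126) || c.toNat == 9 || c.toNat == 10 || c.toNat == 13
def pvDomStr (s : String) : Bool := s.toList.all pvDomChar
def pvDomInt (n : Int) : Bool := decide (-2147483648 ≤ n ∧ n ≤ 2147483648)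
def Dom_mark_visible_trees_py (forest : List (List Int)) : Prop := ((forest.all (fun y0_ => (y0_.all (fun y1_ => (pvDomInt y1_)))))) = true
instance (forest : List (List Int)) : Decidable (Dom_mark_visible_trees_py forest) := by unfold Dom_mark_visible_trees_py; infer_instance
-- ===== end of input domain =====

-- B replaces A's per-cell directional scans by four whole-grid running-maximum sweeps
-- (objective: faster); equivalence is proved on rectangular grids — on ragged grids
-- with rows of different lengths Python A raises IndexError, which Pre_ excludes.


-- ===== PORT A =====
-- forest[row_id_to_check][tree_id_to_check]; indices are in range under Pre_, so getD 0 is exact there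
def pvTarget (forest : List (List Int)) (r c : Int) : Int :=
  PySem.List.pyGetD (PySem.List.pyGetD forest r []) c 0

def pvVisNorth (forest : List (List Int)) (r c : Int) : Bool :=
  (PySem.List.enumerate forest).all (fun p =>
    if p.1 < r then !(decide (PySem.List.pyGetD p.2 c 0 ≥ pvTarget forest r c)) else true)

def pvVisSouth (forest : List (List Int)) (r c : Int) : Bool :=
  (PySem.List.enumerate forest).all (fun p =>
    if p.1 > r then !(decide (PySem.List.pyGetD p.2 c 0 ≥ pvTarget forest r c)) else true)

def pvVisEast (forest : List (List Int)) (r c : Int) : Bool :=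
  (PySem.List.enumerate (PySem.List.pyGetD forest r [])).all (fun p =>
    if p.1 > c then !(decide (p.2 ≥ pvTarget forest r c)) else true)

def pvVisWest (forest : List (List Int)) (r c : Int) : Bool :=
  (PySem.List.enumerate (PySem.List.pyGetD forest r [])).all (fun p =>
    if p.1 < c then !(decide (p.2 ≥ pvTarget forest r c)) else true)

def mark_visible_trees_py (forest : List (List Int)) : List (List Bool) :=
  (PySem.List.enumerate forest).map (fun rp =>
    (PySem.List.enumerate rp.2).map (fun cp =>
      (pvVisNorth forest rp.1 cp.1 || pvVisSouth forest rp.1 cp.1 ||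
       pvVisEast forest rp.1 cp.1 || pvVisWest forest rp.1 cp.1)))

-- ===== PORT B =====
-- running-maximum sweep: entry j is true iff tree j beats the running max of the trees before it
def pvWestGo (mx : Option Int) : List Int → List Bool
  | [] => []
  | t :: ts =>
      (match mx with | none => true | some m => decide (m < t)) ::
        pvWestGo (some (match mx with | none => t | some m => max m t)) ts

def pvWest (l : List Int) : List Bool := pvWestGo none l

def pvEast (l : List Int) : List Bool := (pvWest l.reverse).reverse

def mark_visible_trees_py_alt (forest : List (List Int)) : List (List Bool) :=
  let m := (forest.headD []).length
  let cols := (List.range m).map (fun j => forest.map (fun row => row.getD j 0))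
  let W := forest.map pvWest
  let E := forest.map pvEast
  let N := cols.map pvWest
  let S := cols.map pvEast
  (List.range forest.length).map (fun i =>
    (List.range ((forest.getD i []).length)).map (fun j =>
      ((W.getD i []).getD j false || (E.getD i []).getD j false ||
       (N.getD j []).getD i false || (S.getD j []).getD i false)))

-- ===== PRECONDITION & SPEC =====
-- Pre_ excludes exactly the ragged grids (two rows of different lengths), on which Python A raises IndexError
def Pre_mark_visible_trees_py (forest : List (List Int)) : Prop :=
  ∀ row ∈ forest, row.length = (forest.headD []).length
instance (forest : List (List Int)) : Decidable (Pre_mark_visible_trees_py forest) := by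
  unfold Pre_mark_visible_trees_py; infer_instance

def pvWitness_mark_visible_trees_py : List (List Int) := [[1, 2], [3, 4]]

def Spec_mark_visible_trees_py (forest : List (List Int)) (out : List (List Bool)) : Prop := out = mark_visible_trees_py_alt forest
instance (forest : List (List Int)) (out : List (List Bool)) : Decidable (Spec_mark_visible_trees_py forest out) := by unfold Spec_mark_visible_trees_py; infer_instance

-- ===== CLAIM (what is proved, stated in full; the proofs are below) =====
def Claim_equal_mark_visible_trees_py : Prop := ∀ (forest : List (List Int)), Dom_mark_visible_trees_py forest → Pre_mark_visible_trees_py forest → Spec_mark_visible_trees_py forest (mark_visible_trees_py forest)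

-- ===== LEMMAS AND PROOFS =====

-- value of tree (i, j); out-of-range reads default to 0 (never reached under Pre_)
def pvG (F : List (List Int)) (i j : Nat) : Int := (F.getD i []).getD j 0

-- canonical per-cell visibility predicates both ports are reduced to
def pvCN (F : List (List Int)) (i j : Nat) : Bool := decide (∀ k, k < i → pvG F k j < pvG F i j)
def pvCS (F : List (List Int)) (i j : Nat) : Bool := decide (∀ k, k < F.length → i < k → pvG F k j < pvG F i j)
def pvCE (F : List (List Int)) (i j : Nat) : Bool := decide (∀ k, k < (F.getD i []).length → j < k → pvG F i k < pvG F i j)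
def pvCW (F : List (List Int)) (i j : Nat) : Bool := decide (∀ k, k < j → pvG F i k < pvG F i j)
def pvC (F : List (List Int)) : List (List Bool) :=
  (List.range F.length).map (fun i =>
    (List.range ((F.getD i []).length)).map (fun j =>
      pvCN F i j || pvCS F i j || pvCE F i j || pvCW F i j))

theorem pvAllEnum {α : Type} (F : List α) (p : Int × α → Bool) :
    ((PySem.List.enumerate F).all p = true) ↔ ∀ k : Nat, (h : k < F.length) → p ((k : Int), F[k]) = true := by
  rw [List.all_eq_true]
  constructor
  · intro h k hk
    have hm : ((k : Int), F[k]) ∈ PySem.List.enumerate F := by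
      rw [PySem.List.mem_enumerate_iff]; exact ⟨k, hk, by simp⟩
    exact h _ hm
  · intro h q hq
    rw [PySem.List.mem_enumerate_iff] at hq
    obtain ⟨k, hk, rfl⟩ := hq
    simpa using h k hk

theorem pvTarget_eq (F : List (List Int)) (i j : Nat) : pvTarget F ↑i ↑j = pvG F i j := by
  simp [pvTarget, pvG, PySem.List.pyGetD_natCast]

theorem pvGetElem_getD {α : Type} (l : List α) (k : Nat) (h : k < l.length) (d : α) :
    l[k] = l.getD k d := (List.getD_eq_getElem l d h).symm

theorem visNorth_eq (F : List (List Int)) (i j : Nat) (hi : i < F.length) :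
    pvVisNorth F ↑i ↑j = pvCN F i j := by
  apply Bool.coe_iff_coe.mp
  rw [pvVisNorth, pvAllEnum, pvCN]
  simp only [pvTarget_eq, Nat.cast_lt, decide_eq_true_eq]
  constructor
  · intro h k hk
    have := h k (by omega)
    rw [if_pos hk] at this
    simp only [Bool.not_eq_true', decide_eq_false_iff_not, not_le,
      PySem.List.pyGetD_natCast] at this
    rwa [pvGetElem_getD F k (by omega) [], ← pvG] at this
  · intro h k hk
    by_cases hki : k < i
    · rw [if_pos hki]
      simp only [Bool.not_eq_true', decide_eq_false_iff_not, not_le, PySem.List.pyGetD_natCast]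
      rw [pvGetElem_getD F k hk [], ← pvG]
      exact h k hki
    · rw [if_neg hki]

theorem visSouth_eq (F : List (List Int)) (i j : Nat) :
    pvVisSouth F ↑i ↑j = pvCS F i j := by
  apply Bool.coe_iff_coe.mp
  rw [pvVisSouth, pvAllEnum, pvCS]
  simp only [pvTarget_eq, Nat.cast_lt, decide_eq_true_eq]
  constructor
  · intro h k hk hik
    have := h k hk
    rw [if_pos (by exact_mod_cast hik)] at this
    simp only [Bool.not_eq_true', decide_eq_false_iff_not, not_le,
      PySem.List.pyGetD_natCast] at this
    rwa [pvGetElem_getD F k hk [], ← pvG] at this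
  · intro h k hk
    by_cases hki : i < k
    · rw [if_pos hki]
      simp only [Bool.not_eq_true', decide_eq_false_iff_not, not_le, PySem.List.pyGetD_natCast]
      rw [pvGetElem_getD F k hk [], ← pvG]
      exact h k hk hki
    · rw [if_neg hki]

theorem visEast_eq (F : List (List Int)) (i j : Nat) :
    pvVisEast F ↑i ↑j = pvCE F i j := by
  apply Bool.coe_iff_coe.mp
  rw [pvVisEast, PySem.List.pyGetD_natCast, pvAllEnum, pvCE]
  simp only [pvTarget_eq, decide_eq_true_eq]
  constructor
  · intro h k hk hjk
    have := h k hk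
    rw [if_pos (by exact_mod_cast hjk)] at this
    simp only [Bool.not_eq_true', decide_eq_false_iff_not, not_le] at this
    rwa [pvGetElem_getD _ k hk 0, ← pvG] at this
  · intro h k hk
    by_cases hki : j < k
    · rw [if_pos (show (↑k : Int) > ↑j by exact_mod_cast hki)]
      simp only [Bool.not_eq_true', decide_eq_false_iff_not, not_le]
      rw [pvGetElem_getD _ k hk 0, ← pvG]
      exact h k hk hki
    · rw [if_neg (show ¬((↑k : Int) > ↑j) by exact_mod_cast hki)]

theorem visWest_eq (F : List (List Int)) (i j : Nat) (hj : j < (F.getD i []).length) :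
    pvVisWest F ↑i ↑j = pvCW F i j := by
  apply Bool.coe_iff_coe.mp
  rw [pvVisWest, PySem.List.pyGetD_natCast, pvAllEnum, pvCW]
  simp only [pvTarget_eq, Nat.cast_lt, decide_eq_true_eq]
  constructor
  · intro h k hk
    have := h k (by omega)
    rw [if_pos hk] at this
    simp only [Bool.not_eq_true', decide_eq_false_iff_not, not_le] at this
    rwa [pvGetElem_getD _ k (by omega) 0, ← pvG] at this
  · intro h k hk
    by_cases hki : k < j
    · rw [if_pos hki]
      simp only [Bool.not_eq_true', decide_eq_false_iff_not, not_le]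
      rw [pvGetElem_getD _ k hk 0, ← pvG]
      exact h k hki
    · rw [if_neg hki]

theorem pvA_eq_C (F : List (List Int)) : mark_visible_trees_py F = pvC F := by
  unfold mark_visible_trees_py pvC
  apply List.ext_getElem
  · simp [PySem.List.length_enumerate]
  intro i h1 h2
  simp only [List.getElem_map, PySem.List.getElem_enumerate, List.getElem_range, zero_add]
  have hi : i < F.length := by simpa [PySem.List.length_enumerate] using h2
  apply List.ext_getElem
  · simp [PySem.List.length_enumerate, pvGetElem_getD F i hi []]
  intro j h3 h4
  simp only [List.getElem_map, PySem.List.getElem_enumerate, List.getElem_range, zero_add]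
  have hj : j < (F.getD i []).length := by
    simpa [PySem.List.length_enumerate, pvGetElem_getD F i hi []] using h3
  rw [visNorth_eq F i j hi, visSouth_eq F i j, visEast_eq F i j, visWest_eq F i j hj]

theorem pvWestGo_length (mx : Option Int) (l : List Int) : (pvWestGo mx l).length = l.length := by
  induction l generalizing mx with
  | nil => rfl
  | cons t ts ih => simp [pvWestGo, ih]

theorem pvWestGo_getD (l : List Int) (mx : Option Int) (j : Nat) (h : j < l.length) :
    ((pvWestGo mx l).getD j false = true) ↔
      ((∀ m, mx = some m → m < l.getD j 0) ∧ ∀ k, k < j → l.getD k 0 < l.getD j 0) := by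
  induction l generalizing mx j with
  | nil => simp at h
  | cons t ts ih =>
    cases j with
    | zero =>
      cases mx <;> simp [pvWestGo]
    | succ j =>
      have hj : j < ts.length := by simpa using h
      have := ih (mx := some (match mx with | none => t | some m => max m t)) j hj
      simp only [pvWestGo, List.getD_cons_succ] at this ⊢
      rw [this]
      constructor
      · rintro ⟨h1, h2⟩
        cases mx with
        | none =>
          refine ⟨by simp, ?_⟩
          intro k hk
          cases k with
          | zero => simpa using h1 _ rfl
          | succ k => exact h2 k (by omega)
        | some m =>
          have := h1 _ rfl
          refine ⟨?_, ?_⟩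
          · intro m' hm'; cases hm'
            exact lt_of_le_of_lt (le_max_left _ _) this
          · intro k hk
            cases k with
            | zero => simpa using lt_of_le_of_lt (le_max_right _ _) this
            | succ k => exact h2 k (by omega)
      · rintro ⟨h1, h2⟩
        refine ⟨?_, fun k hk => h2 (k+1) (by omega)⟩
        intro m' hm'
        cases mx with
        | none =>
          cases hm'
          simpa using h2 0 (by omega)
        | some m =>
          cases hm'
          have hm := h1 m rfl
          have ht := h2 0 (by omega)
          simp only [List.getD_cons_zero] at ht
          exact max_lt hm ht

theorem pvWest_getD (l : List Int) (j : Nat) (h : j < l.length) :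
    ((pvWest l).getD j false = true) ↔ ∀ k, k < j → l.getD k 0 < l.getD j 0 := by
  rw [pvWest, pvWestGo_getD l none j h]
  simp

theorem pvGetD_reverse (l : List Int) (k : Nat) (h : k < l.length) :
    l.reverse.getD k 0 = l.getD (l.length - 1 - k) 0 := by
  rw [List.getD_eq_getElem _ _ (by simpa using h), List.getElem_reverse, List.getD_eq_getElem]

theorem pvEast_getD (l : List Int) (j : Nat) (h : j < l.length) :
    ((pvEast l).getD j false = true) ↔ ∀ k, k < l.length → j < k → l.getD k 0 < l.getD j 0 := by
  have hlen : (pvWest l.reverse).length = l.length := by simp [pvWest, pvWestGo_length]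
  have hj' : l.length - 1 - j < l.length := by omega
  rw [pvEast, List.getD_eq_getElem _ _ (by simpa [hlen] using h), List.getElem_reverse,
    ← List.getD_eq_getElem _ false]
  · rw [show (pvWest l.reverse).length - 1 - j = l.length - 1 - j by rw [hlen],
      pvWest_getD _ _ (by simpa using hj'),
      pvGetD_reverse _ _ hj', show l.length - 1 - (l.length - 1 - j) = j by omega]
    constructor
    · intro hall k hk hjk
      have := hall (l.length - 1 - k) (by omega)
      rwa [pvGetD_reverse _ _ (by omega), show l.length - 1 - (l.length - 1 - k) = k by omega] at this
    · intro hall k hk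
      rw [pvGetD_reverse _ _ (by omega)]
      exact hall _ (by omega) (by omega)

-- getD of a map, in range
theorem pvGetD_map {α β : Type} (f : α → β) (l : List α) (i : Nat) (d : α) (d' : β) (h : i < l.length) :
    (l.map f).getD i d' = f (l.getD i d) := by
  rw [List.getD_eq_getElem _ _ (by simpa using h), List.getElem_map, List.getD_eq_getElem _ _ h]

theorem pvB_eq_C (F : List (List Int)) (hP : Pre_mark_visible_trees_py F) :
    mark_visible_trees_py_alt F = pvC F := by
  unfold Pre_mark_visible_trees_py at hP
  unfold mark_visible_trees_py_alt pvC
  apply List.map_congr_left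
  intro i hi
  rw [List.mem_range] at hi
  apply List.map_congr_left
  intro j hj
  rw [List.mem_range] at hj
  have hm : (F.getD i []).length = (F.headD []).length :=
    hP _ (by rw [List.getD_eq_getElem _ _ hi]; exact List.getElem_mem hi)
  have hjm : j < (F.headD []).length := by omega
  set colj : List Int := F.map (fun row => row.getD j 0) with hcolj
  have hcols : ((List.range (F.headD []).length).map
      (fun j => F.map (fun row => row.getD j 0))).getD j [] = colj := by
    rw [pvGetD_map _ _ _ 0 _ (by simpa using hjm), List.getD_eq_getElem _ _ (by simpa using hjm),
      List.getElem_range]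
  have hcollen : colj.length = F.length := by simp [hcolj]
  have hcolk : ∀ k, k < F.length → colj.getD k 0 = pvG F k j := by
    intro k hk
    rw [hcolj, pvGetD_map _ _ _ [] _ hk, pvG]
  have hW : ((F.map pvWest).getD i []).getD j false = pvCW F i j := by
    rw [pvGetD_map _ _ _ [] _ hi]
    apply Bool.coe_iff_coe.mp
    rw [pvWest_getD _ _ hj, pvCW]
    simp [pvG]
  have hE : ((F.map pvEast).getD i []).getD j false = pvCE F i j := by
    rw [pvGetD_map _ _ _ [] _ hi]
    apply Bool.coe_iff_coe.mp
    rw [pvEast_getD _ _ hj, pvCE]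
    simp [pvG]
  have hN : ((((List.range (F.headD []).length).map
      (fun j => F.map (fun row => row.getD j 0))).map pvWest).getD j []).getD i false = pvCN F i j := by
    rw [pvGetD_map pvWest _ _ [] _ (by simpa using hjm), hcols]
    apply Bool.coe_iff_coe.mp
    rw [pvWest_getD _ _ (by omega), pvCN]
    simp only [decide_eq_true_eq]
    constructor
    · intro h k hk
      have := h k hk
      rwa [hcolk k (by omega), hcolk i hi] at this
    · intro h k hk
      rw [hcolk k (by omega), hcolk i hi]
      exact h k hk
  have hS : ((((List.range (F.headD []).length).map
      (fun j => F.map (fun row => row.getD j 0))).map pvEast).getD j []).getD i false = pvCS F i j := by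
    rw [pvGetD_map pvEast _ _ [] _ (by simpa using hjm), hcols]
    apply Bool.coe_iff_coe.mp
    rw [pvEast_getD _ _ (by omega), pvCS]
    simp only [decide_eq_true_eq]
    constructor
    · intro h k hk hik
      have := h k (by omega) hik
      rwa [hcolk k hk, hcolk i hi] at this
    · intro h k hk hik
      rw [hcolk k (by omega), hcolk i hi]
      exact h k (by omega) hik
  rw [hW, hE, hN, hS]
  cases pvCN F i j <;> cases pvCS F i j <;> cases pvCE F i j <;> cases pvCW F i j <;> rfl

-- ===== VERDICT (by name: the statement is the Claim_ definition above) =====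
theorem mark_visible_trees_py_spec : Claim_equal_mark_visible_trees_py := by
  intro F _ hP
  unfold Spec_mark_visible_trees_py
  rw [pvA_eq_C, pvB_eq_C F hP]
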